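-- pv_equiv track=rewrite | github.com/Bigmango1892/ppbabi | ppbabi/renew/calceig.py | _activation_func
-- ===== SOURCE A (Python) =====
-- def _activation_func(n: int):
--     alpha = 1
--     result = []
--     tmp = 1
--     for i in range(n):
--         result.append(tmp)
--         tmp = tmp * alpha
--     return result
-- ===== SOURCE B (Python) =====
-- def _activation_func(n: int):
--     return [1] * n
-- ===== Notes on version B (the rewrite author's own statement) =====
-- stated objective: simpler
-- what changed: Since alpha=1 the running product is constantly 1, so the accumulation loop is replaced by the closed-form list construction [1]*n.
import Mathlib
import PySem

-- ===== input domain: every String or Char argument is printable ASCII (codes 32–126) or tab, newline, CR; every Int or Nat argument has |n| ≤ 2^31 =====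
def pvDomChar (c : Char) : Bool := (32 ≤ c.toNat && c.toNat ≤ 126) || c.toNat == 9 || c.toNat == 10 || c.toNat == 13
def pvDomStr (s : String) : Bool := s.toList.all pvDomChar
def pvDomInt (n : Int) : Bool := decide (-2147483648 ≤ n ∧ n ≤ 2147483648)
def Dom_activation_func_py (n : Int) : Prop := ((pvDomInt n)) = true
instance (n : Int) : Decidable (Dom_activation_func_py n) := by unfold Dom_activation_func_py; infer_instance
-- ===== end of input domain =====

-- B replaces the alpha=1 accumulation loop with the closed form [1]*n (objective: simpler).


-- ===== PORT A =====
-- literal transliteration: alpha = 1; tmp accumulator; for i in range(n): append tmp; tmp *= alpha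
def activation_func_py (n : Int) : List Int :=
  let alpha : Int := 1
  let st := (PySem.List.pyRange 0 n 1).foldl
    (fun (st : List Int × Int) _ => (st.1 ++ [st.2], st.2 * alpha)) ([], (1 : Int))
  st.1

-- ===== PORT B =====
-- transliteration of Source B: [1] * n  (Python list-repeat; empty for n ≤ 0)
def activation_func_py_alt (n : Int) : List Int := List.replicate n.toNat 1

-- ===== PRECONDITION & SPEC =====
def Spec_activation_func_py (n : Int) (out : List Int) : Prop := out = activation_func_py_alt n
instance (n : Int) (out : List Int) : Decidable (Spec_activation_func_py n out) := by unfold Spec_activation_func_py; infer_instance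

-- ===== CLAIM (what is proved, stated in full; the proofs are below) =====
def Claim_equal_activation_func_py : Prop := ∀ (n : Int), Dom_activation_func_py n → Spec_activation_func_py n (activation_func_py n)

-- ===== LEMMAS AND PROOFS =====
-- loop invariant: folding over any list, with tmp = 1 staying 1, appends one 1 per element
lemma activation_loop (l : List Int) (acc : List Int) :
    (l.foldl (fun (st : List Int × Int) _ => (st.1 ++ [st.2], st.2 * 1)) (acc, (1 : Int)))
      = (acc ++ List.replicate l.length 1, 1) := by
  induction l generalizing acc with
  | nil => simp
  | cons x xs ih =>
      have h := ih (acc ++ [1])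
      simp only [List.foldl, mul_one] at h ⊢
      rw [h]
      simp [List.replicate_succ]

-- ===== VERDICT (by name: the statement is the Claim_ definition above) =====
theorem activation_func_py_spec : Claim_equal_activation_func_py := by
  intro n _
  unfold Spec_activation_func_py activation_func_py activation_func_py_alt
  simp only []
  rw [activation_loop]
  simp [PySem.List.pyRange]
  omega
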